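-- pv_equiv track=rewrite | github.com/MichielCreemers/ChessVision | board/moves.py | correct_fen_for_black_top
-- ===== SOURCE A (Python) =====
-- def correct_fen_for_black_top(fen):
--     parts = fen.split(' ')
--     position = parts[0]
--     ranks = position.split('/')
--
--     # Reverse the order of ranks
--     flipped_ranks = ranks[::-1]
--
--     # Reverse the order of files within each rank
--     flipped_files_ranks = [rank[::-1] for rank in flipped_ranks]
--
--     # Reassemble the full FEN string
--     parts[0] = '/'.join(flipped_files_ranks)
--     corrected_fen = ' '.join(parts)
--     return corrected_fen
-- ===== SOURCE B (Python) =====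
-- def correct_fen_for_black_top(fen):
--     # Reversing the whole board field flips rank order and each rank at once,
--     # because the '/' separators sit symmetrically.
--     parts = fen.split(' ')
--     parts[0] = parts[0][::-1]
--     return ' '.join(parts)
-- ===== Notes on version B (the rewrite author's own statement) =====
-- stated objective: simpler
-- what changed: B reverses the entire board field with one slice instead of splitting it into ranks, reversing the rank list and each rank separately and rejoining; the slash separators sit symmetrically so one full reversal gives the same string.
import Mathlib
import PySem

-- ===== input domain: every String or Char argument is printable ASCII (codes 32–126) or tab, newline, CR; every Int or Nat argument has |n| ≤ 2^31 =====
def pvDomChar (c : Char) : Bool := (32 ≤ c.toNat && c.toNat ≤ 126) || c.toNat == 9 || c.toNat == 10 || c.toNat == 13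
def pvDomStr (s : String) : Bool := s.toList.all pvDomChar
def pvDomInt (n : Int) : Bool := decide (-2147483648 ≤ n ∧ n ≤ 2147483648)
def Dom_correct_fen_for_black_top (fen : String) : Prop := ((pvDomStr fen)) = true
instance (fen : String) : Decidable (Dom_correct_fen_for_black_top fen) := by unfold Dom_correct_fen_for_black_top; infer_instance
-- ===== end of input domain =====

-- B reverses the whole board field with one slice instead of splitting it into ranks and
-- reversing rank order and each rank separately (objective: simpler).


-- ===== PORT A =====
def correct_fen_for_black_top (fen : String) : String :=
  let parts := PySem.Chars.splitOn fen.toList [' ']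
  -- parts[0]: str.split never returns an empty list, so the IndexError branch is unreachable; getD [] is exact
  let position := (PySem.List.pyGet? parts 0).getD []
  let ranks := PySem.Chars.splitOn position ['/']
  -- ranks[::-1] and rank[::-1]: step -1 never raises, so getD [] is exact
  let flipped_ranks := (PySem.List.slice? ranks none none (-1)).getD []
  let flipped_files_ranks := flipped_ranks.map (fun rank => (PySem.List.slice? rank none none (-1)).getD [])
  let parts' := parts.set 0 (PySem.Chars.join ['/'] flipped_files_ranks)
  String.ofList (PySem.Chars.join [' '] parts')

-- ===== PORT B =====
def correct_fen_for_black_top_alt (fen : String) : String :=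
  let parts := PySem.Chars.splitOn fen.toList [' ']
  -- parts[0] exists (split never returns []); parts[0][::-1] via slice? with step -1 is exact
  let parts' := parts.set 0 ((PySem.List.slice? ((PySem.List.pyGet? parts 0).getD []) none none (-1)).getD [])
  String.ofList (PySem.Chars.join [' '] parts')

-- ===== PRECONDITION & SPEC =====
def Spec_correct_fen_for_black_top (fen : String) (out : String) : Prop := out = correct_fen_for_black_top_alt fen
instance (fen : String) (out : String) : Decidable (Spec_correct_fen_for_black_top fen out) := by unfold Spec_correct_fen_for_black_top; infer_instance

-- ===== CLAIM (what is proved, stated in full; the proofs are below) =====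
def Claim_equal_correct_fen_for_black_top : Prop := ∀ (fen : String), Dom_correct_fen_for_black_top fen → Spec_correct_fen_for_black_top fen (correct_fen_for_black_top fen)

-- ===== LEMMAS AND PROOFS =====

-- simple structural single-character split, used only in the proofs
def pvSplit1 (c : Char) : List Char → List (List Char)
  | [] => [[]]
  | x :: rest =>
    if x = c then [] :: pvSplit1 c rest
    else match pvSplit1 c rest with
      | [] => [[x]]          -- unreachable
      | h :: t => (x :: h) :: t

theorem pvSplit1_ne_nil (c : Char) (s : List Char) : pvSplit1 c s ≠ [] := by
  cases s with
  | nil => simp [pvSplit1]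
  | cons x rest =>
    simp only [pvSplit1]
    split
    · simp
    · split <;> simp

theorem pvSplitOn_go_eq (c : Char) (l cur : List Char) (acc : List (List Char))
    (fuel : Nat) (hf : l.length < fuel) :
    PySem.Chars.splitOn.go [c] fuel l cur acc =
      acc.reverse ++ (match pvSplit1 c l with
        | [] => []            -- unreachable
        | h :: t => (cur.reverse ++ h) :: t) := by
  induction l generalizing fuel cur acc with
  | nil =>
    cases fuel with
    | zero => omega
    | succ f => simp [PySem.Chars.splitOn.go, pvSplit1]
  | cons x rest ih =>
    cases fuel with
    | zero => omega
    | succ f =>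
      by_cases hx : x = c
      · subst hx
        have hpre : List.isPrefixOf [x] (x :: rest) = true := by
          simp [List.isPrefixOf]
        rw [show PySem.Chars.splitOn.go [x] (f + 1) (x :: rest) cur acc =
              PySem.Chars.splitOn.go [x] f (List.drop 1 (x :: rest)) [] (cur.reverse :: acc) by
            simp [PySem.Chars.splitOn.go, hpre]]
        simp only [List.drop_succ_cons, List.drop_zero]
        rw [ih [] (cur.reverse :: acc) f (by simp at hf; omega)]
        simp [pvSplit1]
        cases h1 : pvSplit1 x rest with
        | nil => exact absurd h1 (pvSplit1_ne_nil x rest)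
        | cons h t => simp
      · have hpre : List.isPrefixOf [c] (x :: rest) = false := by
          simp [List.isPrefixOf]
          exact fun h => hx h.symm
        rw [show PySem.Chars.splitOn.go [c] (f + 1) (x :: rest) cur acc =
              PySem.Chars.splitOn.go [c] f rest (x :: cur) acc by
            simp [PySem.Chars.splitOn.go, hpre]]
        rw [ih (x :: cur) acc f (by simp at hf; omega)]
        simp only [pvSplit1, if_neg hx]
        cases h1 : pvSplit1 c rest with
        | nil => exact absurd h1 (pvSplit1_ne_nil c rest)
        | cons h t => simp

theorem pvSplitOn_single (c : Char) (s : List Char) :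
    PySem.Chars.splitOn s [c] = pvSplit1 c s := by
  have := pvSplitOn_go_eq c s [] [] (s.length + 1) (by omega)
  rw [PySem.Chars.splitOn, this]
  cases h1 : pvSplit1 c s with
  | nil => exact absurd h1 (pvSplit1_ne_nil c s)
  | cons h t => simp

theorem pvJoin_append_singleton (sep y : List Char) (xs : List (List Char)) (hxs : xs ≠ []) :
    PySem.Chars.join sep (xs ++ [y]) = PySem.Chars.join sep xs ++ sep ++ y := by
  induction xs with
  | nil => simp at hxs
  | cons p rest ih =>
    cases rest with
    | nil => simp [PySem.Chars.join_singleton, PySem.Chars.join_cons_cons]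
    | cons q r =>
      rw [show (p :: q :: r) ++ [y] = p :: ((q :: r) ++ [y]) by simp,
          show p :: ((q :: r) ++ [y]) = p :: (q :: (r ++ [y])) by simp,
          PySem.Chars.join_cons_cons, PySem.Chars.join_cons_cons]
      have := ih (by simp)
      rw [show (q :: r) ++ [y] = q :: (r ++ [y]) by simp] at this
      rw [this]
      simp [List.append_assoc]

theorem pvJoin_reverse (sep : List Char) (l : List (List Char)) :
    (PySem.Chars.join sep l).reverse =
      PySem.Chars.join sep.reverse (l.reverse.map List.reverse) := by
  induction l with
  | nil => simp [PySem.Chars.join_nil]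
  | cons p rest ih =>
    cases rest with
    | nil => simp [PySem.Chars.join_singleton]
    | cons q r =>
      rw [PySem.Chars.join_cons_cons]
      have hrw : List.map List.reverse ((p :: q :: r).reverse)
          = List.map List.reverse ((q :: r).reverse) ++ [p.reverse] := by simp
      rw [hrw, pvJoin_append_singleton _ _ _ (by simp), ← ih]
      simp [List.append_assoc]

theorem pvJoin_split1 (c : Char) (s : List Char) :
    PySem.Chars.join [c] (pvSplit1 c s) = s := by
  induction s with
  | nil => simp [pvSplit1, PySem.Chars.join_singleton]
  | cons x rest ih =>
    simp only [pvSplit1]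
    by_cases hx : x = c
    · subst hx
      rw [if_pos rfl]
      cases h1 : pvSplit1 x rest with
      | nil => exact absurd h1 (pvSplit1_ne_nil x rest)
      | cons h t =>
        rw [PySem.Chars.join_cons_cons]
        rw [h1] at ih
        simp [ih]
    · rw [if_neg hx]
      cases h1 : pvSplit1 c rest with
      | nil => exact absurd h1 (pvSplit1_ne_nil c rest)
      | cons h t =>
        rw [h1] at ih
        cases t with
        | nil => simp_all [PySem.Chars.join_singleton]
        | cons q r =>
          rw [PySem.Chars.join_cons_cons] at *
          simp [← ih]

-- the heart of the equivalence: reversing ranks and files separately = reversing the board field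
theorem pvFlip_eq_reverse (s : List Char) :
    PySem.Chars.join ['/'] (((PySem.Chars.splitOn s ['/']).reverse).map List.reverse)
      = s.reverse := by
  rw [pvSplitOn_single]
  have h := pvJoin_reverse ['/'] (pvSplit1 '/' s)
  rw [pvJoin_split1] at h
  simp only [List.reverse_singleton] at h
  exact h.symm

-- ===== VERDICT (by name: the statement is the Claim_ definition above) =====
theorem correct_fen_for_black_top_spec : Claim_equal_correct_fen_for_black_top := by
  intro fen _
  unfold Spec_correct_fen_for_black_top correct_fen_for_black_top correct_fen_for_black_top_alt
  simp only [PySem.List.slice?_none_none_neg_one, Option.getD_some]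
  rw [pvFlip_eq_reverse]
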